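-- pv_equiv track=rewrite | github.com/hoahai/fastapi | apps/fundsphere/api/v1/helpers/dbQueries.py | _order_budget_change_fields
-- ===== SOURCE A (Python) =====
-- _BUDGET_CHANGE_FIELD_DISPLAY_ORDER = (
--     "subService",
--     "grossAmount",
--     "commission",
--     "netAdjustment",
--     "note",
-- )
--
-- def _order_budget_change_fields(field_names: list[str]) -> list[str]:
--     normalized_fields: list[str] = []
--     seen: set[str] = set()
--     for raw_name in field_names:
--         field_name = str(raw_name or "").strip()
--         if not field_name or field_name in seen:
--             continue
--         normalized_fields.append(field_name)
--         seen.add(field_name)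
--
--     normalized_set = set(normalized_fields)
--     ordered_fields: list[str] = []
--     for field_name in _BUDGET_CHANGE_FIELD_DISPLAY_ORDER:
--         if field_name in normalized_set:
--             ordered_fields.append(field_name)
--
--     for field_name in normalized_fields:
--         if field_name not in _BUDGET_CHANGE_FIELD_DISPLAY_ORDER:
--             ordered_fields.append(field_name)
--     return ordered_fields
-- ===== SOURCE B (Python) =====
-- _BUDGET_CHANGE_FIELD_DISPLAY_ORDER = (
--     "subService",
--     "grossAmount",
--     "commission",
--     "netAdjustment",
--     "note",
-- )
--
-- def _order_budget_change_fields(field_names: list[str]) -> list[str]: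
--     normalized_fields: list[str] = []
--     seen: set[str] = set()
--     for raw_name in field_names:
--         field_name = str(raw_name or "").strip()
--         if not field_name or field_name in seen:
--             continue
--         normalized_fields.append(field_name)
--         seen.add(field_name)
--
--     # one-pass bucket distribution: display fields land in their priority
--     # bucket, everything else in the last bucket in original order
--     pos = {name: i for i, name in enumerate(_BUDGET_CHANGE_FIELD_DISPLAY_ORDER)}
--     n = len(_BUDGET_CHANGE_FIELD_DISPLAY_ORDER)
--     buckets: list[list[str]] = [[] for _ in range(n + 1)]
--     for field_name in normalized_fields:
--         buckets[pos.get(field_name, n)].append(field_name)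
--     return [f for bucket in buckets for f in bucket]
-- ===== Notes on version B (the rewrite author's own statement) =====
-- stated objective: alternative
-- what changed: A's two ordering passes (scan the display tuple against a membership set, then re-scan the normalized list for non-display fields) are replaced by a single bucket-distribution pass keyed by a precomputed priority index, then one concatenation.
import Mathlib
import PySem

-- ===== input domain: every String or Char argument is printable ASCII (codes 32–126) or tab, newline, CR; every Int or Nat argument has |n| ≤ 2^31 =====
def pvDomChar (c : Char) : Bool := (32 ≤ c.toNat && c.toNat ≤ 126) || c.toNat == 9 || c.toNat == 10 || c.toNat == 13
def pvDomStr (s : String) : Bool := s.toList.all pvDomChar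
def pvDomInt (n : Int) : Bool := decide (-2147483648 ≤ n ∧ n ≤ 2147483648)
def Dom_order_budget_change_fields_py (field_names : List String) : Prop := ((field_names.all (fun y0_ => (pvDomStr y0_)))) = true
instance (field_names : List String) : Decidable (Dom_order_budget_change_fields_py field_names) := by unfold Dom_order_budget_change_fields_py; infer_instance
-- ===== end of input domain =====

-- B replaces A's two ordering passes with a single bucket-distribution pass keyed by a
-- precomputed priority index (alternative decomposition; the dedup pass is shared).

-- ===== PORT A =====

-- _BUDGET_CHANGE_FIELD_DISPLAY_ORDER
def pvDisplayOrder : List String :=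
  ["subService", "grossAmount", "commission", "netAdjustment", "note"]

-- field_name = str(raw_name or "").strip(); str(raw_name or "") is ported literally
-- as (if raw_name == "" then "" else raw_name)
def pvNormName (raw_name : String) : String :=
  PySem.Str.strip (if raw_name == "" then "" else raw_name)

-- the dedup/normalization loop, identical in both Pythons (shared helper)
def pvNormStep (st : List String × PySem.Set String) (raw_name : String) :
    List String × PySem.Set String :=
  let field_name := pvNormName raw_name
  if field_name == "" || PySem.Set.contains st.2 field_name then st
  else (st.1 ++ [field_name], PySem.Set.add st.2 field_name)

def pvNormalize (field_names : List String) : List String :=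
  (field_names.foldl pvNormStep ([], PySem.Set.empty)).1

def order_budget_change_fields_py (field_names : List String) : List String :=
  let normalized_fields := pvNormalize field_names
  let normalized_set : PySem.Set String := PySem.Set.ofList normalized_fields
  let ordered_fields := pvDisplayOrder.foldl
    (fun acc field_name =>
      if PySem.Set.contains normalized_set field_name then acc ++ [field_name] else acc) []
  normalized_fields.foldl
    (fun acc field_name =>
      if pvDisplayOrder.contains field_name then acc else acc ++ [field_name])
    ordered_fields

-- ===== PORT B =====

-- pos = {name: i for i, name in enumerate(_BUDGET_CHANGE_FIELD_DISPLAY_ORDER)}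
def pvPos : PySem.Dict String Int :=
  (PySem.List.enumerate pvDisplayOrder).foldl (fun d p => d.insert p.2 p.1) PySem.Dict.empty

-- pos.get(field_name, n)
def pvKey (field_name : String) : Int :=
  PySem.Dict.getD pvPos field_name (pvDisplayOrder.length : Int)

def order_budget_change_fields_py_alt (field_names : List String) : List String :=
  let normalized_fields := pvNormalize field_names
  let buckets := normalized_fields.foldl
    (fun bs field_name =>
      let k := pvKey field_name
      PySem.List.pySetD bs k (PySem.List.pyGetD bs k [] ++ [field_name]))
    (List.replicate (pvDisplayOrder.length + 1) [])
  buckets.flatten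

-- ===== PRECONDITION & SPEC =====
def Spec_order_budget_change_fields_py (field_names : List String) (out : List String) : Prop := out = order_budget_change_fields_py_alt field_names
instance (field_names : List String) (out : List String) : Decidable (Spec_order_budget_change_fields_py field_names out) := by unfold Spec_order_budget_change_fields_py; infer_instance

-- ===== CLAIM (what is proved, stated in full; the proofs are below) =====
def Claim_equal_order_budget_change_fields_py : Prop := ∀ (field_names : List String), Dom_order_budget_change_fields_py field_names → Spec_order_budget_change_fields_py field_names (order_budget_change_fields_py field_names)

-- ===== LEMMAS AND PROOFS =====

lemma pvPos_items : pvPos.items =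
    [("subService", (0 : Int)), ("grossAmount", 1), ("commission", 2),
     ("netAdjustment", 3), ("note", 4)] := by rfl

-- the priority-index lookup in closed form
lemma pvKey_eq (f : String) :
    pvKey f = (if f = "subService" then 0 else if f = "grossAmount" then 1
      else if f = "commission" then 2 else if f = "netAdjustment" then 3
      else if f = "note" then 4 else 5 : Int) := by
  simp only [pvKey, PySem.Dict.getD, PySem.Dict.get?, pvPos_items, List.find?, pvDisplayOrder]
  split_ifs with h0 h1 h2 h3 h4
  · subst h0; rfl
  · subst h1; rfl
  · subst h2; rfl
  · subst h3; rfl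
  · subst h4; rfl
  · simp [beq_eq_false_iff_ne.mpr (Ne.symm h0), beq_eq_false_iff_ne.mpr (Ne.symm h1),
      beq_eq_false_iff_ne.mpr (Ne.symm h2), beq_eq_false_iff_ne.mpr (Ne.symm h3),
      beq_eq_false_iff_ne.mpr (Ne.symm h4)]

-- the shared dedup loop produces a duplicate-free list
lemma pvNormalize_nodup_aux : ∀ (fs : List String) (acc : List String) (seen : PySem.Set String),
    acc.Nodup → (∀ x, PySem.Set.contains seen x = acc.contains x) →
    (fs.foldl pvNormStep (acc, seen)).1.Nodup := by
  intro fs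
  induction fs with
  | nil => intro acc seen h1 _; simpa using h1
  | cons raw fs ih =>
    intro acc seen h1 h2
    rw [List.foldl_cons]
    by_cases hc : (pvNormName raw == "" || PySem.Set.contains seen (pvNormName raw)) = true
    · have hs : pvNormStep (acc, seen) raw = (acc, seen) := by
        simp only [pvNormStep]
        rw [if_pos hc]
      rw [hs]; exact ih acc seen h1 h2
    · simp only [Bool.or_eq_true, not_or] at hc
      have hnin : pvNormName raw ∉ acc := by
        have h := h2 (pvNormName raw)
        have := hc.2
        rw [show PySem.Set.contains seen (pvNormName raw) = acc.contains (pvNormName raw) from h] at this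
        simpa [List.contains_iff_mem] using this
      have hs : pvNormStep (acc, seen) raw =
          (acc ++ [pvNormName raw], seen ++ [pvNormName raw]) := by
        simp only [pvNormStep]
        rw [if_neg (by simp only [Bool.or_eq_true, not_or]; exact hc)]
        have hadd : PySem.Set.add seen (pvNormName raw) = seen ++ [pvNormName raw] := by
          simp only [PySem.Set.add]
          rw [if_neg hc.2]
        rw [hadd]
      rw [hs]
      apply ih
      · simp only [List.nodup_append]
        refine ⟨h1, List.nodup_singleton _, ?_⟩
        intro a ha b hb h
        rw [List.mem_singleton] at hb
        subst hb
        exact hnin (h ▸ ha)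
      · intro x
        simp only [PySem.Set.contains, List.contains_append]
        rw [show List.contains seen x = acc.contains x from h2 x]

lemma pvNormalize_nodup (fs : List String) : (pvNormalize fs).Nodup := by
  apply pvNormalize_nodup_aux
  · exact List.nodup_nil
  · intro x; rfl

-- B's bucket-distribution fold in closed form
lemma pvBucket_fold : ∀ (N b0 b1 b2 b3 b4 b5 : List String),
    N.foldl (fun bs field_name =>
        let k := pvKey field_name
        PySem.List.pySetD bs k (PySem.List.pyGetD bs k [] ++ [field_name]))
      [b0, b1, b2, b3, b4, b5] =
    [b0 ++ N.filter (· == "subService"), b1 ++ N.filter (· == "grossAmount"),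
     b2 ++ N.filter (· == "commission"), b3 ++ N.filter (· == "netAdjustment"),
     b4 ++ N.filter (· == "note"), b5 ++ N.filter (fun f => !pvDisplayOrder.contains f)] := by
  intro N
  induction N with
  | nil => intro b0 b1 b2 b3 b4 b5; simp
  | cons f N ih =>
    intro b0 b1 b2 b3 b4 b5
    rw [List.foldl_cons]
    by_cases h0 : f = "subService"
    · subst h0
      have hstep : PySem.List.pySetD [b0,b1,b2,b3,b4,b5] (pvKey "subService")
          (PySem.List.pyGetD [b0,b1,b2,b3,b4,b5] (pvKey "subService") [] ++ ["subService"])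
          = [b0 ++ ["subService"], b1, b2, b3, b4, b5] := by
        rw [show pvKey "subService" = 0 from by rw [pvKey_eq]; rfl]
        norm_num [PySem.List.pySetD, PySem.List.pySet?, PySem.List.pyIdx?,
          PySem.List.pyGetD, PySem.List.pyGet?]
        try rfl
      rw [show (let k := pvKey "subService"
            PySem.List.pySetD [b0,b1,b2,b3,b4,b5] k (PySem.List.pyGetD [b0,b1,b2,b3,b4,b5] k [] ++ ["subService"]))
            = [b0 ++ ["subService"], b1, b2, b3, b4, b5] from hstep]
      rw [ih]
      simp [pvDisplayOrder]
    · by_cases h1 : f = "grossAmount"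
      · subst h1
        have hstep : PySem.List.pySetD [b0,b1,b2,b3,b4,b5] (pvKey "grossAmount")
            (PySem.List.pyGetD [b0,b1,b2,b3,b4,b5] (pvKey "grossAmount") [] ++ ["grossAmount"])
            = [b0, b1 ++ ["grossAmount"], b2, b3, b4, b5] := by
          rw [show pvKey "grossAmount" = 1 from by rw [pvKey_eq]; rfl]
          norm_num [PySem.List.pySetD, PySem.List.pySet?, PySem.List.pyIdx?,
            PySem.List.pyGetD, PySem.List.pyGet?]
          try rfl
        rw [show (let k := pvKey "grossAmount"
              PySem.List.pySetD [b0,b1,b2,b3,b4,b5] k (PySem.List.pyGetD [b0,b1,b2,b3,b4,b5] k [] ++ ["grossAmount"]))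
              = [b0, b1 ++ ["grossAmount"], b2, b3, b4, b5] from hstep]
        rw [ih]
        simp [pvDisplayOrder]
      · by_cases h2 : f = "commission"
        · subst h2
          have hstep : PySem.List.pySetD [b0,b1,b2,b3,b4,b5] (pvKey "commission")
              (PySem.List.pyGetD [b0,b1,b2,b3,b4,b5] (pvKey "commission") [] ++ ["commission"])
              = [b0, b1, b2 ++ ["commission"], b3, b4, b5] := by
            rw [show pvKey "commission" = 2 from by rw [pvKey_eq]; rfl]
            norm_num [PySem.List.pySetD, PySem.List.pySet?, PySem.List.pyIdx?,
              PySem.List.pyGetD, PySem.List.pyGet?]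
            try rfl
          rw [show (let k := pvKey "commission"
                PySem.List.pySetD [b0,b1,b2,b3,b4,b5] k (PySem.List.pyGetD [b0,b1,b2,b3,b4,b5] k [] ++ ["commission"]))
                = [b0, b1, b2 ++ ["commission"], b3, b4, b5] from hstep]
          rw [ih]
          simp [pvDisplayOrder]
        · by_cases h3 : f = "netAdjustment"
          · subst h3
            have hstep : PySem.List.pySetD [b0,b1,b2,b3,b4,b5] (pvKey "netAdjustment")
                (PySem.List.pyGetD [b0,b1,b2,b3,b4,b5] (pvKey "netAdjustment") [] ++ ["netAdjustment"])
                = [b0, b1, b2, b3 ++ ["netAdjustment"], b4, b5] := by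
              rw [show pvKey "netAdjustment" = 3 from by rw [pvKey_eq]; rfl]
              norm_num [PySem.List.pySetD, PySem.List.pySet?, PySem.List.pyIdx?,
                PySem.List.pyGetD, PySem.List.pyGet?]
              try rfl
            rw [show (let k := pvKey "netAdjustment"
                  PySem.List.pySetD [b0,b1,b2,b3,b4,b5] k (PySem.List.pyGetD [b0,b1,b2,b3,b4,b5] k [] ++ ["netAdjustment"]))
                  = [b0, b1, b2, b3 ++ ["netAdjustment"], b4, b5] from hstep]
            rw [ih]
            simp [pvDisplayOrder]
          · by_cases h4 : f = "note"
            · subst h4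
              have hstep : PySem.List.pySetD [b0,b1,b2,b3,b4,b5] (pvKey "note")
                  (PySem.List.pyGetD [b0,b1,b2,b3,b4,b5] (pvKey "note") [] ++ ["note"])
                  = [b0, b1, b2, b3, b4 ++ ["note"], b5] := by
                rw [show pvKey "note" = 4 from by rw [pvKey_eq]; rfl]
                norm_num [PySem.List.pySetD, PySem.List.pySet?, PySem.List.pyIdx?,
                  PySem.List.pyGetD, PySem.List.pyGet?]
                try rfl
              rw [show (let k := pvKey "note"
                    PySem.List.pySetD [b0,b1,b2,b3,b4,b5] k (PySem.List.pyGetD [b0,b1,b2,b3,b4,b5] k [] ++ ["note"]))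
                    = [b0, b1, b2, b3, b4 ++ ["note"], b5] from hstep]
              rw [ih]
              simp [pvDisplayOrder]
            · have hk : pvKey f = 5 := by rw [pvKey_eq]; simp [h0, h1, h2, h3, h4]
              have hstep : PySem.List.pySetD [b0,b1,b2,b3,b4,b5] (pvKey f)
                  (PySem.List.pyGetD [b0,b1,b2,b3,b4,b5] (pvKey f) [] ++ [f])
                  = [b0, b1, b2, b3, b4, b5 ++ [f]] := by
                rw [hk]
                norm_num [PySem.List.pySetD, PySem.List.pySet?, PySem.List.pyIdx?,
                  PySem.List.pyGetD, PySem.List.pyGet?]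
                try rfl
              rw [show (let k := pvKey f
                    PySem.List.pySetD [b0,b1,b2,b3,b4,b5] k (PySem.List.pyGetD [b0,b1,b2,b3,b4,b5] k [] ++ [f]))
                    = [b0, b1, b2, b3, b4, b5 ++ [f]] from hstep]
              rw [ih]
              simp [pvDisplayOrder, h0, h1, h2, h3, h4]

-- a duplicate-free list filtered for a single value
lemma pvFilter_single {N : List String} (hN : N.Nodup) (c : String) :
    N.filter (· == c) = if c ∈ N then [c] else [] := by
  rw [List.filter_beq]
  by_cases h : c ∈ N
  · simp [h, List.count_eq_one_of_mem hN h]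
  · simp [h, List.count_eq_zero.mpr h]

lemma pvMain (N : List String) (hN : N.Nodup) :
    N.foldl (fun acc field_name =>
        if pvDisplayOrder.contains field_name then acc else acc ++ [field_name])
      (pvDisplayOrder.foldl (fun acc field_name =>
          if PySem.Set.contains (PySem.Set.ofList N) field_name then acc ++ [field_name] else acc) [])
    = (N.foldl (fun bs field_name =>
        let k := pvKey field_name
        PySem.List.pySetD bs k (PySem.List.pyGetD bs k [] ++ [field_name]))
      (List.replicate (pvDisplayOrder.length + 1) [])).flatten := by
  rw [show (List.replicate (pvDisplayOrder.length + 1) ([] : List String))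
      = [[], [], [], [], [], []] from rfl]
  rw [pvBucket_fold]
  have hsw : (fun (acc : List String) field_name =>
      if pvDisplayOrder.contains field_name then acc else acc ++ [field_name])
      = (fun acc field_name =>
      if (!pvDisplayOrder.contains field_name) then acc ++ [field_name] else acc) := by
    funext acc fn; cases pvDisplayOrder.contains fn <;> simp
  rw [hsw, PySem.List.foldl_append_if]
  have hmem : ∀ x : String, PySem.Set.contains (PySem.Set.ofList N) x = N.contains x := by
    intro x
    simp [PySem.Set.contains, PySem.Set.mem_ofList]
  simp only [pvDisplayOrder, List.foldl_cons, List.foldl_nil, hmem,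
    pvFilter_single hN, List.flatten, List.contains_iff_mem]
  split_ifs <;> simp_all
-- ===== VERDICT (by name: the statement is the Claim_ definition above) =====
theorem order_budget_change_fields_py_spec : Claim_equal_order_budget_change_fields_py := by
  intro field_names _
  unfold Spec_order_budget_change_fields_py
  unfold order_budget_change_fields_py order_budget_change_fields_py_alt
  exact pvMain (pvNormalize field_names) (pvNormalize_nodup field_names)
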